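-- pv_equiv track=rewrite | github.com/Pvtwuyver/programmeertheorie | PythonCode/greedy_types.py | search
-- ===== SOURCE A (Python) =====
-- def search(list, maxWidth, maxHeight, type):
-- 	while type > 0:
-- 		for i in list:
-- 			if (i[0] <= maxWidth) and (i[1] <= maxHeight) and (i[2] == type):
-- 				list.remove(i)
-- 				return i
-- 		type -= 1
-- 	return None
-- ===== SOURCE B (Python) =====
-- def search(list, maxWidth, maxHeight, type):
--     # One pass: keep the first fitting item with the largest type value <= type.
--     # Same in-place mutation as A: the chosen item is removed from the list.
--     best = None
--     for i in list:
--         if i[0] <= maxWidth and i[1] <= maxHeight and 0 < i[2] <= type: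
--             if best is None or i[2] > best[2]:
--                 best = i
--     if best is not None:
--         list.remove(best)
--     return best
-- ===== Notes on version B (the rewrite author's own statement) =====
-- stated objective: faster
-- what changed: Replaced the countdown loop that rescans the whole list once per type value with a single pass that keeps the first fitting item of maximal type value <= type (equivalence is about the return value; both versions remove the returned item from the list in place).
import Mathlib
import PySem

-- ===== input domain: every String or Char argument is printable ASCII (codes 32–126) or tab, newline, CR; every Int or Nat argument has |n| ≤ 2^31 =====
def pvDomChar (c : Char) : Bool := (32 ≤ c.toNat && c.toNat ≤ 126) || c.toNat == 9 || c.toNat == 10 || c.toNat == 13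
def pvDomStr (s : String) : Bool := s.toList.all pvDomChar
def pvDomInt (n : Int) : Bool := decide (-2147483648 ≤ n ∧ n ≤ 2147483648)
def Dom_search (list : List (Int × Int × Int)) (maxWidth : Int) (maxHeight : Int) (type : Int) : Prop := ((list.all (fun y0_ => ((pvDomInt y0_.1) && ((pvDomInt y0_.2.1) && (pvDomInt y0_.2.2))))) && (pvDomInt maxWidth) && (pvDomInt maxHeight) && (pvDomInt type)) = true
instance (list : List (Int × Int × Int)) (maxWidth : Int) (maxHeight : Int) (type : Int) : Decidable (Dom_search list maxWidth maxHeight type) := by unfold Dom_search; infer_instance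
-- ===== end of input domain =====

-- B replaces A's countdown-and-rescan loop by a single pass keeping the first fitting
-- item of maximal type value ≤ type (faster; both mutate the caller's list identically:
-- the equivalence proved here is about the return value).


-- ===== PORT A =====
-- the inner 'for i in list: if …: return i' scan
def searchScan (l : List (Int × Int × Int)) (maxWidth maxHeight t : Int) : Option (Int × Int × Int) :=
  match l with
  | [] => none
  | i :: rest =>
      if i.1 ≤ maxWidth ∧ i.2.1 ≤ maxHeight ∧ i.2.2 = t then some i
      else searchScan rest maxWidth maxHeight t

-- the 'while type > 0' loop; the fuel is type.toNat, and t is the current type value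
def searchWhile (l : List (Int × Int × Int)) (maxWidth maxHeight : Int) (t : Int) : Nat → Option (Int × Int × Int)
  | 0 => none
  | n+1 =>
      match searchScan l maxWidth maxHeight t with
      | some i => some i
      | none => searchWhile l maxWidth maxHeight (t - 1) n

def search (list : List (Int × Int × Int)) (maxWidth : Int) (maxHeight : Int) (type : Int) : Option (Int × Int × Int) :=
  searchWhile list maxWidth maxHeight type type.toNat

-- ===== PORT B =====
def stepB (maxWidth maxHeight type : Int) (best : Option (Int × Int × Int)) (i : Int × Int × Int) : Option (Int × Int × Int) :=
  if i.1 ≤ maxWidth ∧ i.2.1 ≤ maxHeight ∧ 0 < i.2.2 ∧ i.2.2 ≤ type then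
    match best with
    | none => some i
    | some b => if i.2.2 > b.2.2 then some i else some b
  else best

def search_alt (list : List (Int × Int × Int)) (maxWidth : Int) (maxHeight : Int) (type : Int) : Option (Int × Int × Int) :=
  list.foldl (stepB maxWidth maxHeight type) none

-- ===== PRECONDITION & SPEC =====
def Spec_search (list : List (Int × Int × Int)) (maxWidth : Int) (maxHeight : Int) (type : Int) (out : Option (Int × Int × Int)) : Prop := out = search_alt list maxWidth maxHeight type
instance (list : List (Int × Int × Int)) (maxWidth : Int) (maxHeight : Int) (type : Int) (out : Option (Int × Int × Int)) : Decidable (Spec_search list maxWidth maxHeight type out) := by unfold Spec_search; infer_instance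

-- ===== CLAIM (what is proved, stated in full; the proofs are below) =====
def Claim_equal_search : Prop := ∀ (list : List (Int × Int × Int)) (maxWidth : Int) (maxHeight : Int) (type : Int), Dom_search list maxWidth maxHeight type → Spec_search list maxWidth maxHeight type (search list maxWidth maxHeight type)

-- ===== LEMMAS AND PROOFS =====

-- if the type bound is non-positive, B's fold does nothing
theorem foldB_nonpos (mw mh t : Int) (ht : t ≤ 0) :
    ∀ (l : List (Int × Int × Int)) (acc : Option (Int × Int × Int)),
      l.foldl (stepB mw mh t) acc = acc := by
  intro l
  induction l with
  | nil => intro acc; rfl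
  | cons i rest ih =>
      intro acc
      have : stepB mw mh t acc i = acc := by
        unfold stepB
        split_ifs with h
        · exact absurd (le_trans h.2.2.2 ht) (not_le.mpr h.2.2.1)
        · rfl
      simp [List.foldl, this, ih]

-- an accumulator whose type value already meets the bound is never replaced
theorem foldB_keep (mw mh t : Int) (b : Int × Int × Int) (hb : t ≤ b.2.2) :
    ∀ (l : List (Int × Int × Int)),
      l.foldl (stepB mw mh t) (some b) = some b := by
  intro l
  induction l with
  | nil => rfl
  | cons i rest ih =>
      have : stepB mw mh t (some b) i = some b := by
        unfold stepB
        split_ifs with h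
        · simp only [gt_iff_lt, if_neg (not_lt.mpr (le_trans h.2.2.2 hb))]
        · rfl
      simp [List.foldl, this, ih]

-- if A's scan finds the first item of type value t, B's fold (from any accumulator
-- strictly below t) ends on exactly that item
theorem foldB_hit (mw mh t : Int) (ht : 0 < t) :
    ∀ (l : List (Int × Int × Int)) (i : Int × Int × Int)
      (hscan : searchScan l mw mh t = some i)
      (acc : Option (Int × Int × Int))
      (hacc : ∀ b, acc = some b → b.2.2 < t),
      l.foldl (stepB mw mh t) acc = some i := by
  intro l
  induction l with
  | nil => intro i hscan; simp [searchScan] at hscan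
  | cons j rest ih =>
      intro i hscan acc hacc
      by_cases hc : j.1 ≤ mw ∧ j.2.1 ≤ mh ∧ j.2.2 = t
      · have hji : j = i := by
          simpa [searchScan, hc] using hscan
        subst hji
        have hstep : stepB mw mh t acc j = some j := by
          unfold stepB
          rw [if_pos ⟨hc.1, hc.2.1, by omega, le_of_eq hc.2.2⟩]
          cases acc with
          | none => rfl
          | some b =>
              have := hacc b rfl
              simp only [gt_iff_lt, if_pos (by omega : b.2.2 < j.2.2)]
        simp only [List.foldl, hstep]
        exact foldB_keep mw mh t j (le_of_eq hc.2.2.symm) rest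
      · have hscan' : searchScan rest mw mh t = some i := by
          simpa [searchScan, hc] using hscan
        have hstep : ∀ b, stepB mw mh t acc j = some b → b.2.2 < t := by
          intro b hb
          unfold stepB at hb
          split_ifs at hb with h
          · have hjt : j.2.2 < t := by
              rcases h with ⟨h1, h2, _, h4⟩
              rcases lt_or_eq_of_le h4 with h' | h'
              · exact h'
              · exact absurd ⟨h1, h2, h'⟩ hc
            cases acc with
            | none => cases hb; exact hjt
            | some b0 =>
                have hb0 := hacc b0 rfl
                simp only [gt_iff_lt] at hb
                split_ifs at hb <;> cases hb
                · exact hjt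
                · exact hb0
          · exact hacc b hb
        simp only [List.foldl]
        exact ih i hscan' _ hstep
-- if A's scan finds nothing of type value t, lowering the bound to t-1 changes nothing
theorem foldB_miss (mw mh t : Int) :
    ∀ (l : List (Int × Int × Int))
      (hnone : ∀ j ∈ l, ¬ (j.1 ≤ mw ∧ j.2.1 ≤ mh ∧ j.2.2 = t))
      (acc : Option (Int × Int × Int)),
      l.foldl (stepB mw mh t) acc = l.foldl (stepB mw mh (t - 1)) acc := by
  intro l
  induction l with
  | nil => intro _ acc; rfl
  | cons j rest ih =>
      intro hnone acc
      have hj := hnone j (List.mem_cons_self)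
      have hstep : stepB mw mh t acc j = stepB mw mh (t - 1) acc j := by
        unfold stepB
        by_cases h1 : j.1 ≤ mw ∧ j.2.1 ≤ mh ∧ 0 < j.2.2 ∧ j.2.2 ≤ t
        · have hne : j.2.2 ≠ t := fun he => hj ⟨h1.1, h1.2.1, he⟩
          rw [if_pos h1, if_pos ⟨h1.1, h1.2.1, h1.2.2.1, by omega⟩]
        · have h2 : ¬ (j.1 ≤ mw ∧ j.2.1 ≤ mh ∧ 0 < j.2.2 ∧ j.2.2 ≤ t - 1) := by
            intro h; exact h1 ⟨h.1, h.2.1, h.2.2.1, by omega⟩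
          rw [if_neg h1, if_neg h2]
      simp only [List.foldl, hstep]
      exact ih (fun k hk => hnone k (List.mem_cons_of_mem _ hk)) _

theorem scan_none (mw mh t : Int) :
    ∀ (l : List (Int × Int × Int)), searchScan l mw mh t = none →
      ∀ j ∈ l, ¬ (j.1 ≤ mw ∧ j.2.1 ≤ mh ∧ j.2.2 = t) := by
  intro l
  induction l with
  | nil => intro _ j hj; simp at hj
  | cons i rest ih =>
      intro h j hj
      by_cases hc : i.1 ≤ mw ∧ i.2.1 ≤ mh ∧ i.2.2 = t
      · simp [searchScan, hc] at h
      · have h' : searchScan rest mw mh t = none := by simpa [searchScan, hc] using h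
        rcases List.mem_cons.mp hj with rfl | hj'
        · exact hc
        · exact ih h' j hj'

theorem while_eq_fold (mw mh : Int) (l : List (Int × Int × Int)) :
    ∀ (n : Nat) (t : Int), t = (n : Int) →
      searchWhile l mw mh t n = l.foldl (stepB mw mh t) none := by
  intro n
  induction n with
  | zero =>
      intro t ht
      subst ht
      exact (foldB_nonpos mw mh 0 le_rfl l none).symm
  | succ n ih =>
      intro t ht
      have htpos : 0 < t := by omega
      cases hscan : searchScan l mw mh t with
      | some i =>
          simp only [searchWhile, hscan]
          exact (foldB_hit mw mh t htpos l i hscan none (by intro b h; cases h)).symm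
      | none =>
          simp only [searchWhile, hscan]
          rw [ih (t - 1) (by omega)]
          exact (foldB_miss mw mh t l (scan_none mw mh t l hscan) none).symm

-- ===== VERDICT (by name: the statement is the Claim_ definition above) =====
theorem search_spec : Claim_equal_search := by
  intro list mw mh t _
  unfold Spec_search search search_alt
  by_cases ht : 0 ≤ t
  · exact while_eq_fold mw mh list t.toNat t (by omega)
  · have h0 : t.toNat = 0 := Int.toNat_of_nonpos (by omega)
    rw [h0]
    exact (foldB_nonpos mw mh t (by omega) list none).symm
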